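-- pv_equiv track=rewrite | github.com/KamorionLabs/terraform-aws-ops | lambdas/fetch-ssm/fetch_ssm.py | normalize_parameter_key
-- ===== SOURCE A (Python) =====
-- INSTANCE_ENV_MAPPING = {
--     # Legacy naming convention
--     "mi1": {"stg": "staging", "ppd": "preprod", "prd": "prod"},
--     "mi2": {"stg": "staging", "ppd": "preprod", "prd": "prod"},
--     "mi3": {"stg": "staging", "ppd": "preprod", "prd": "prod"},
--     "fr": {"stg": "staging", "ppd": "preprod", "prd": "prod"},
--     "bene": {"stg": "staging", "ppd": "preprod", "prd": "prod"},
--     "indus": {"stg": "staging", "ppd": "preprod", "prd": "prod"},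
-- }
--
-- def normalize_parameter_key(name: str, source: str, instance: str, env: str) -> str:
--     """
--     Normalize parameter name to a common key format for comparison.
--
--     This handles the path transformation between Legacy and NH:
--     - Legacy: /rubix/mi1/preprod/key
--     - NH: /rubix/ppd/mi1/key
--
--     Returns a normalized key like: /rubix/{env}/{instance}/key
--     """
--     # Get the legacy environment name
--     legacy_env = INSTANCE_ENV_MAPPING.get(instance.lower(), {}).get(env.lower(), env)
--
--     if source == "legacy":
--         # Legacy format: /rubix/{instance}/{legacy_env}/key
--         # Convert to: /rubix/{env}/{instance}/key
--         prefix_legacy = f"/{instance.lower()}/{legacy_env}/"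
--         for base in ["/rubix", "/hybris"]:
--             if name.startswith(f"{base}{prefix_legacy}"):
--                 suffix = name[len(f"{base}{prefix_legacy}"):]
--                 return f"{base}/{env.lower()}/{instance.lower()}/{suffix}"
--     else:
--         # NH format: /rubix/{env}/{instance}/key - already normalized
--         pass
--
--     return name
-- ===== SOURCE B (Python) =====
-- INSTANCE_ENV_MAPPING = {
--     "mi1": {"stg": "staging", "ppd": "preprod", "prd": "prod"},
--     "mi2": {"stg": "staging", "ppd": "preprod", "prd": "prod"},
--     "mi3": {"stg": "staging", "ppd": "preprod", "prd": "prod"},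
--     "fr": {"stg": "staging", "ppd": "preprod", "prd": "prod"},
--     "bene": {"stg": "staging", "ppd": "preprod", "prd": "prod"},
--     "indus": {"stg": "staging", "ppd": "preprod", "prd": "prod"},
-- }
--
-- def normalize_parameter_key(name: str, source: str, instance: str, env: str) -> str:
--     """Component-wise normalization: parse the path into segments instead of
--     matching a concatenated prefix string."""
--     legacy_env = INSTANCE_ENV_MAPPING.get(instance.lower(), {}).get(env.lower(), env)
--     if source == "legacy":
--         seg = name.split("/", 4)
--         if (len(seg) == 5 and seg[0] == "" and seg[1] in ("rubix", "hybris")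
--                 and seg[2] == instance.lower() and seg[3] == legacy_env):
--             return f"/{seg[1]}/{env.lower()}/{instance.lower()}/{seg[4]}"
--     return name
-- ===== Notes on version B (the rewrite author's own statement) =====
-- stated objective: simpler
-- what changed: B parses the name into path components with one split('/', 4) and compares segments, instead of constructing two candidate prefix strings and looping over bases with startswith/len-slicing.
-- outside the precondition, e.g. on normalize_parameter_key('/rubix/a/b/x/k', 'legacy', 'a/b', 'x'): A returns '/rubix/x/a/b/k', B returns '/rubix/a/b/x/k'
import Mathlib
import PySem

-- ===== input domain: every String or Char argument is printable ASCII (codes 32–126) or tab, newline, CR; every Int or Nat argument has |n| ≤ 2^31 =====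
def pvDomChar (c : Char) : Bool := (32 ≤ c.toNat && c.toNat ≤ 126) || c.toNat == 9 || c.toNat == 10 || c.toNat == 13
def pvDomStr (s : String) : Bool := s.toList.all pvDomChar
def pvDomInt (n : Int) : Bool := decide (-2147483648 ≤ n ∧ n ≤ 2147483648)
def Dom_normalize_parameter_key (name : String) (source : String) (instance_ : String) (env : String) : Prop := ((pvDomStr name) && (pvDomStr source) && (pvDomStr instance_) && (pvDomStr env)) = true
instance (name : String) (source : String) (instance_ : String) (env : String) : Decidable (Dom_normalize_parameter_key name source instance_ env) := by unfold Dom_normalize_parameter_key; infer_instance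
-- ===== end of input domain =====

-- B parses the name into path components with one split('/', 4) and compares segments, instead of
-- constructing candidate prefix strings and looping over bases with startswith; objective: simpler.

-- ===== PORT A =====
def pvStdEnvDict : PySem.Dict String String :=
  PySem.Dict.mk [("stg", "staging"), ("ppd", "preprod"), ("prd", "prod")]

def pvInstanceEnvMapping : PySem.Dict String (PySem.Dict String String) :=
  PySem.Dict.mk [("mi1", pvStdEnvDict), ("mi2", pvStdEnvDict), ("mi3", pvStdEnvDict),
                 ("fr", pvStdEnvDict), ("bene", pvStdEnvDict), ("indus", pvStdEnvDict)]

-- the 'for base in ["/rubix", "/hybris"]' loop with its early return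
def pvForBases : List (List Char) → List Char → List Char → List Char → List Char → Option (List Char)
  | [], _, _, _, _ => none
  | base :: rest, nameL, prefL, envL, instL =>
    if PySem.Chars.startswith nameL (base ++ prefL) then
      some (base ++ '/' :: envL ++ '/' :: instL ++ '/' ::
            PySem.Chars.slice nameL (some (PySem.List.len (base ++ prefL))) none)
    else pvForBases rest nameL prefL envL instL

def normalize_parameter_key (name : String) (source : String) (instance_ : String) (env : String) : String :=
  let legacy_env : String :=
    PySem.Dict.getD (PySem.Dict.getD pvInstanceEnvMapping (PySem.Str.lower instance_) (PySem.Dict.mk []))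
      (PySem.Str.lower env) env
  if source = "legacy" then
    let prefL : List Char := '/' :: (PySem.Chars.lower instance_.toList) ++ '/' :: legacy_env.toList ++ ['/']
    match pvForBases ["/rubix".toList, "/hybris".toList] name.toList prefL
            (PySem.Chars.lower env.toList) (PySem.Chars.lower instance_.toList) with
    | some r => String.ofList r
    | none => name
  else name

-- ===== PORT B =====
def normalize_parameter_key_alt (name : String) (source : String) (instance_ : String) (env : String) : String :=
  let legacy_env : String :=
    PySem.Dict.getD (PySem.Dict.getD pvInstanceEnvMapping (PySem.Str.lower instance_) (PySem.Dict.mk []))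
      (PySem.Str.lower env) env
  if source = "legacy" then
    let seg := PySem.Chars.splitOnMax name.toList ['/'] 4
    if seg.length = 5 ∧ PySem.List.pyGetD seg 0 [] = ([] : List Char)
        ∧ (PySem.List.pyGetD seg 1 [] = "rubix".toList ∨ PySem.List.pyGetD seg 1 [] = "hybris".toList)
        ∧ PySem.List.pyGetD seg 2 [] = PySem.Chars.lower instance_.toList
        ∧ PySem.List.pyGetD seg 3 [] = legacy_env.toList then
      String.ofList ('/' :: PySem.List.pyGetD seg 1 [] ++ '/' :: PySem.Chars.lower env.toList
        ++ '/' :: PySem.Chars.lower instance_.toList ++ '/' :: PySem.List.pyGetD seg 4 [])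
    else name
  else name

-- ===== PRECONDITION & SPEC =====
-- Pre_ excludes inputs where (for source "legacy") instance_ or env contains '/': there A's
-- concatenated-prefix match can cross path-segment boundaries, a malformed-identifier corner on
-- which A's value is an accident of string concatenation and B's leaving the name unchanged is
-- equally defensible.
def Pre_normalize_parameter_key (name : String) (source : String) (instance_ : String) (env : String) : Prop :=
  source = "legacy" → ('/' ∉ instance_.toList ∧ '/' ∉ env.toList)
instance (name : String) (source : String) (instance_ : String) (env : String) : Decidable (Pre_normalize_parameter_key name source instance_ env) := by unfold Pre_normalize_parameter_key; infer_instance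

def pvWitness_normalize_parameter_key : String × String × String × String :=
  ("/rubix/mi1/preprod/db/pass", "legacy", "mi1", "ppd")

def Spec_normalize_parameter_key (name : String) (source : String) (instance_ : String) (env : String) (out : String) : Prop := out = normalize_parameter_key_alt name source instance_ env
instance (name : String) (source : String) (instance_ : String) (env : String) (out : String) : Decidable (Spec_normalize_parameter_key name source instance_ env out) := by unfold Spec_normalize_parameter_key; infer_instance

-- ===== CLAIM (what is proved, stated in full; the proofs are below) =====
def Claim_equal_normalize_parameter_key : Prop := ∀ (name : String) (source : String) (instance_ : String) (env : String), Dom_normalize_parameter_key name source instance_ env → Pre_normalize_parameter_key name source instance_ env → Spec_normalize_parameter_key name source instance_ env (normalize_parameter_key name source instance_ env)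

-- ===== LEMMAS AND PROOFS =====

lemma pv_char_toNat_ofNat (n : Nat) (h : n.isValidChar) : (Char.ofNat n).toNat = n := by
  rw [Char.ofNat, dif_pos h, Char.ofNatAux]
  simp [Char.toNat, UInt32.toNat_ofNatLT]

-- '/' in the lowercased string comes from a '/' in the original
lemma pv_mem_lower_slash (l : List Char) : '/' ∈ PySem.Chars.lower l → '/' ∈ l := by
  intro h
  rw [PySem.Chars.lower] at h
  obtain ⟨x, hx, hEq⟩ := List.mem_map.mp h
  rw [PySem.Chars.lowerChar] at hEq
  split at hEq
  · rename_i hup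
    exfalso
    simp [PySem.Chars.isupper, Char.le_def, UInt32.le_iff_toNat_le] at hup
    have h1 : 65 ≤ x.toNat := hup.1
    have h2 : x.toNat ≤ 90 := hup.2
    have hv : (x.toNat + 32).isValidChar := Or.inl (by omega)
    have hEq' := congrArg Char.toNat hEq
    rw [pv_char_toNat_ofNat _ hv] at hEq'
    have : x.toNat + 32 = 47 := hEq'
    omega
  · exact hEq ▸ hx

-- the split loop with m = 0 returns the remainder as the last piece
lemma pv_go_m0 (fuel : Nat) (l cur : List Char) (acc : List (List Char)) :
    PySem.Chars.splitOnMax.go ['/'] fuel 0 l cur acc = ((cur.reverse ++ l) :: acc).reverse := by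
  cases fuel with
  | zero => rw [PySem.Chars.splitOnMax.go.eq_def]
  | succ f =>
    cases l with
    | nil => rw [PySem.Chars.splitOnMax.go.eq_def]; simp
    | cons c rest => rw [PySem.Chars.splitOnMax.go.eq_def]; simp

-- consuming one '/'-free segment followed by a separator
lemma pv_go_consume (a : List Char) (ha : '/' ∉ a) :
    ∀ (fuel m : Nat) (l cur : List Char) (acc : List (List Char)), a.length < fuel → m ≠ 0 →
    PySem.Chars.splitOnMax.go ['/'] fuel m (a ++ '/' :: l) cur acc
      = PySem.Chars.splitOnMax.go ['/'] (fuel - (a.length + 1)) (m - 1) l [] ((cur.reverse ++ a) :: acc) := by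
  induction a with
  | nil =>
    intro fuel m l cur acc hf hm
    obtain ⟨f, rfl⟩ : ∃ f, fuel = f + 1 := ⟨fuel - 1, by omega⟩
    rw [PySem.Chars.splitOnMax.go.eq_def]
    simp [hm, List.isPrefixOf]
  | cons x a' ih =>
    intro fuel m l cur acc hf hm
    obtain ⟨f, rfl⟩ : ∃ f, fuel = f + 1 := ⟨fuel - 1, by omega⟩
    have hx : x ≠ '/' := by simp at ha; tauto
    have ha' : '/' ∉ a' := by simp at ha; tauto
    rw [PySem.Chars.splitOnMax.go.eq_def]
    simp only [List.cons_append]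
    rw [if_neg hm]
    have hpre : List.isPrefixOf ['/'] (x :: (a' ++ '/' :: l)) = false := by
      simp [List.isPrefixOf]; exact fun h => absurd h.symm hx
    rw [hpre]
    simp only [Bool.false_eq_true, if_false]
    rw [ih ha' f m l (x :: cur) acc (by simp at hf ⊢; omega) hm]
    simp only [List.reverse_cons, List.append_assoc, List.singleton_append, List.length_cons]
    congr 1
    omega

-- splitting a well-formed 5-segment legacy path
lemma pv_split5 (b i e rest : List Char) (hb : '/' ∉ b) (hi : '/' ∉ i) (he : '/' ∉ e) :
    PySem.Chars.splitOnMax ('/' :: (b ++ '/' :: (i ++ '/' :: (e ++ '/' :: rest)))) ['/'] 4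
      = [[], b, i, e, rest] := by
  unfold PySem.Chars.splitOnMax
  norm_num
  rw [show ('/' :: (b ++ '/' :: (i ++ '/' :: (e ++ '/' :: rest)))) = [] ++ '/' :: (b ++ '/' :: (i ++ '/' :: (e ++ '/' :: rest))) from rfl]
  rw [pv_go_consume [] (by simp) _ _ _ _ _ (by simp) (by omega)]
  rw [pv_go_consume b hb _ _ _ _ _ (by simp) (by omega)]
  rw [pv_go_consume i hi _ _ _ _ _ (by simp) (by omega)]
  rw [pv_go_consume e he _ _ _ _ _ (by simp) (by omega)]
  norm_num
  rw [pv_go_m0]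
  simp

-- joining the pieces of the split recovers the input
def pvJoin : List (List Char) → List Char
  | [] => []
  | [t] => t
  | t :: ts => t ++ '/' :: pvJoin ts

lemma pv_go_join : ∀ (fuel m : Nat) (l cur : List Char) (acc : List (List Char)), l.length < fuel →
    ∃ r, PySem.Chars.splitOnMax.go ['/'] fuel m l cur acc = acc.reverse ++ r ∧
         cur.reverse ++ l = pvJoin r ∧ r ≠ [] := by
  intro fuel
  induction fuel with
  | zero => intro m l cur acc h; omega
  | succ f ih =>
    intro m l cur acc h
    cases l with
    | nil =>
      refine ⟨[cur.reverse], ?_, by simp [pvJoin], by simp⟩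
      rw [PySem.Chars.splitOnMax.go.eq_def]; simp
    | cons x rest =>
      by_cases hm : m = 0
      · subst hm
        refine ⟨[cur.reverse ++ x :: rest], ?_, by simp [pvJoin], by simp⟩
        rw [PySem.Chars.splitOnMax.go.eq_def]; simp
      · by_cases hx : x = '/'
        · subst hx
          rw [PySem.Chars.splitOnMax.go.eq_def]
          simp only [hm, if_false, List.isPrefixOf]
          norm_num
          obtain ⟨r, h1, h2, h3⟩ := ih (m - 1) rest [] (cur.reverse :: acc) (by simp at h ⊢; omega)
          refine ⟨cur.reverse :: r, ?_, ?_, by simp⟩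
          · rw [h1]; simp
          · cases r with
            | nil => exact absurd rfl h3
            | cons t ts => simp [pvJoin] at h2 ⊢; rw [← h2]
        · rw [PySem.Chars.splitOnMax.go.eq_def]
          have hbeq : ('/' == x) = false := by simp; exact fun hh => hx hh.symm
          simp only [List.isPrefixOf, hbeq, Bool.false_and, Bool.false_eq_true, if_false, if_neg hm]
          obtain ⟨r, h1, h2, h3⟩ := ih m rest (x :: cur) acc (by simp at h ⊢; omega)
          exact ⟨r, h1, by simpa using h2, h3⟩

lemma pv_split_join (l : List Char) : l = pvJoin (PySem.Chars.splitOnMax l ['/'] 4) := by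
  unfold PySem.Chars.splitOnMax
  rw [if_neg (by norm_num)]
  show l = pvJoin (PySem.Chars.splitOnMax.go ['/'] (l.length + 1) 4 l [] [])
  obtain ⟨r, h1, h2, h3⟩ := pv_go_join (l.length + 1) 4 l [] [] (by omega)
  rw [h1]; simpa using h2

-- a dict lookup with default returns the default or one of the stored values
lemma pv_getD_mem {κ ν : Type} [BEq κ] (d : PySem.Dict κ ν) (k : κ) (dv : ν) :
    PySem.Dict.getD d k dv = dv ∨ PySem.Dict.getD d k dv ∈ d.items.map Prod.snd := by
  rw [PySem.Dict.getD, PySem.Dict.get?]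
  cases hf : List.find? (fun p => p.1 == k) d.items with
  | none => left; rfl
  | some p =>
    right
    simp only [Option.map_some, Option.getD_some]
    exact List.mem_map.mpr ⟨p, List.mem_of_find?_eq_some hf, rfl⟩

-- legacy_env contains no '/' when env contains none
lemma pv_legacy_env_no_slash (instance_ env : String) (henv : '/' ∉ env.toList) :
    '/' ∉ (PySem.Dict.getD (PySem.Dict.getD pvInstanceEnvMapping (PySem.Str.lower instance_)
            (PySem.Dict.mk [])) (PySem.Str.lower env) env).toList := by
  rcases pv_getD_mem pvInstanceEnvMapping (PySem.Str.lower instance_) (PySem.Dict.mk []) with ho | ho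
  · rw [ho]
    rw [PySem.Dict.getD, PySem.Dict.get?]
    exact henv
  · simp only [pvInstanceEnvMapping, List.map_cons, List.map_nil, List.mem_cons,
      List.not_mem_nil, or_false] at ho
    have ho' : PySem.Dict.getD pvInstanceEnvMapping (PySem.Str.lower instance_) (PySem.Dict.mk [])
        = pvStdEnvDict := by tauto
    rw [ho']
    rcases pv_getD_mem pvStdEnvDict (PySem.Str.lower env) env with h | h
    · rw [h]; exact henv
    · simp only [pvStdEnvDict, List.map_cons, List.map_nil, List.mem_cons, List.not_mem_nil,
        or_false] at h ⊢
      rcases h with h | h | h <;> rw [h] <;> decide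

-- ===== VERDICT (by name: the statement is the Claim_ definition above) =====
theorem normalize_parameter_key_spec : Claim_equal_normalize_parameter_key := by
  intro name source instance_ env _dom hpre
  unfold Spec_normalize_parameter_key normalize_parameter_key normalize_parameter_key_alt
  by_cases hsrc : source = "legacy"
  · simp only [if_pos hsrc]
    obtain ⟨hinst, henv⟩ := hpre hsrc
    set lenv : String := PySem.Dict.getD (PySem.Dict.getD pvInstanceEnvMapping
        (PySem.Str.lower instance_) (PySem.Dict.mk [])) (PySem.Str.lower env) env with hld
    set instl : List Char := PySem.Chars.lower instance_.toList with hinstl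
    set envl : List Char := PySem.Chars.lower env.toList with henvl
    have hle : '/' ∉ lenv.toList := pv_legacy_env_no_slash instance_ env henv
    have hil : '/' ∉ instl := fun h => hinst (pv_mem_lower_slash _ h)
    by_cases h1 : PySem.Chars.startswith name.toList
        ("/rubix".toList ++ ('/' :: instl ++ '/' :: lenv.toList ++ ['/'])) = true
    · obtain ⟨rest, hr⟩ := (PySem.Chars.startswith_iff _ _).mp h1
      have hname5 : name.toList
          = '/' :: ("rubix".toList ++ '/' :: (instl ++ '/' :: (lenv.toList ++ '/' :: rest))) := by
        rw [← hr]; simp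
      have hseg : PySem.Chars.splitOnMax name.toList ['/'] 4
          = [[], "rubix".toList, instl, lenv.toList, rest] := by
        rw [hname5]; exact pv_split5 _ _ _ _ (by decide) hil hle
      have hslice : PySem.Chars.slice name.toList
          (some (PySem.List.len ("/rubix".toList ++ ('/' :: instl ++ '/' :: lenv.toList ++ ['/'])))) none = rest := by
        rw [← hr]
        simp only [PySem.Chars.slice_eq_listSlice, PySem.List.len_eq, PySem.List.slice_from_natCast]
        exact List.drop_left
      simp only [pvForBases, if_pos h1, hseg, PySem.List.pyGetD_ofNat', List.getD, hslice]
      rw [if_pos ⟨by simp, rfl, Or.inl rfl, rfl, rfl⟩]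
      congr 1
    · by_cases h2 : PySem.Chars.startswith name.toList
          ("/hybris".toList ++ ('/' :: instl ++ '/' :: lenv.toList ++ ['/'])) = true
      · obtain ⟨rest, hr⟩ := (PySem.Chars.startswith_iff _ _).mp h2
        have hname5 : name.toList
            = '/' :: ("hybris".toList ++ '/' :: (instl ++ '/' :: (lenv.toList ++ '/' :: rest))) := by
          rw [← hr]; simp
        have hseg : PySem.Chars.splitOnMax name.toList ['/'] 4
            = [[], "hybris".toList, instl, lenv.toList, rest] := by
          rw [hname5]; exact pv_split5 _ _ _ _ (by decide) hil hle
        have hslice : PySem.Chars.slice name.toList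
            (some (PySem.List.len ("/hybris".toList ++ ('/' :: instl ++ '/' :: lenv.toList ++ ['/'])))) none = rest := by
          rw [← hr]
          simp only [PySem.Chars.slice_eq_listSlice, PySem.List.len_eq, PySem.List.slice_from_natCast]
          exact List.drop_left
        simp only [pvForBases, if_pos h2, if_neg h1, hseg, PySem.List.pyGetD_ofNat', List.getD, hslice]
        rw [if_pos ⟨by simp, rfl, Or.inr rfl, rfl, rfl⟩]
        congr 1
      · simp only [pvForBases, if_neg h1, if_neg h2]
        rw [if_neg]
        rintro ⟨hL, h0, hb1, h2', h3'⟩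
        have hj := pv_split_join name.toList
        obtain ⟨s0, s1, s2, s3, s4, hseg⟩ : ∃ a b c d e,
            PySem.Chars.splitOnMax name.toList ['/'] 4 = [a, b, c, d, e] := by
          rcases hx : PySem.Chars.splitOnMax name.toList ['/'] 4 with
            _ | ⟨a, _ | ⟨b, _ | ⟨c, _ | ⟨d, _ | ⟨e, tl⟩⟩⟩⟩⟩ <;>
            rw [hx] at hL <;> simp at hL
          exact ⟨a, b, c, d, e, by rw [hL]⟩
        rw [hseg] at h0 hb1 h2' h3' hj
        simp only [PySem.List.pyGetD_ofNat', List.getD] at h0 hb1 h2' h3'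
        subst h0 h2' h3'
        simp only [pvJoin, List.nil_append] at hj
        rcases hb1 with hb | hb
        · subst hb
          apply h1
          rw [PySem.Chars.startswith_iff]
          exact ⟨s4, by rw [hj]; simp⟩
        · subst hb
          apply h2
          rw [PySem.Chars.startswith_iff]
          exact ⟨s4, by rw [hj]; simp⟩
  · simp only [if_neg hsrc]
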